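-- pv_equiv track=rewrite | github.com/chingistoktamyssov/CCC | '13/CCC '13 S5 - Factor Solitaire.py | solve
-- ===== SOURCE A (Python) =====
-- def solve(n):
--   if n == 1:
--     return 0
--   else:
--
--     f2list = []
--     for x in range(1, (n // 2) + 1):
--       if (n - x) % x == 0:
--         f2list.append((n-x)//x)
--
--     f2 = min(f2list)
--     f1 = n // (f2 + 1)
--     p = f1 * f2
--
--     return f2 + solve(p)
-- ===== SOURCE B (Python) =====
-- def solve(n):
--     total = 0
--     while n > 1:
--         # smallest prime factor by trial division up to sqrt(n)
--         spf = n
--         d = 2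
--         while d * d <= n:
--             if n % d == 0:
--                 spf = d
--                 break
--             d += 1
--         total += spf - 1
--         n -= n // spf
--     return total
-- ===== Notes on version B (the rewrite author's own statement) =====
-- stated objective: faster
-- what changed: Replaces the recursive O(n) scan of all x in [1, n//2] (building a list of all candidate f2 values and taking its min) by an iterative loop that finds the smallest prime factor by trial division up to sqrt(n) and accumulates spf-1 directly.
import Mathlib
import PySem

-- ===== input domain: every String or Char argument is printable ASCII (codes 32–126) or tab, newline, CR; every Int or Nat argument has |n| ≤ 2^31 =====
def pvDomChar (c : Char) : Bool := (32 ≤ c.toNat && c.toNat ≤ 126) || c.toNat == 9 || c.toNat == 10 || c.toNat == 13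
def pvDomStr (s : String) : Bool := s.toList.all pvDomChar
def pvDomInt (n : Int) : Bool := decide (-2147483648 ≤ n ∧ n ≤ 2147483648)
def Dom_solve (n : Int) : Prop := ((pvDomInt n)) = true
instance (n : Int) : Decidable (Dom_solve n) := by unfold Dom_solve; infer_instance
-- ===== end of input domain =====

-- B replaces A's scan over all x ≤ n//2 (collecting candidates and taking min) by an
-- iterative loop doing trial division up to sqrt(n) (faster); on n ≤ 0 (outside Pre_) A raises, B returns 0.

-- ===== PORT A =====
-- the list A's for-loop builds (helper named so the termination argument can cite it; same loop, same appends)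
def f2listA (n : Int) : List Int :=
  (PySem.List.pyRange 1 (PySem.Int.floordiv n 2 + 1) 1).foldl
    (fun acc x => if PySem.Int.mod (n - x) x == 0 then acc ++ [PySem.Int.floordiv (n - x) x] else acc) []

-- exact division: (n - x) / x = n / x - 1 when x ∣ n, 0 < x (used by membership lemma)
theorem div_sub_self (x n : Int) (hx : 0 < x) (h : x ∣ n) : (n - x) / x = n / x - 1 := by
  obtain ⟨k, hk⟩ := h
  subst hk
  rw [show x * k - x = x * (k - 1) by ring, Int.mul_ediv_cancel_left _ (by omega),
      Int.mul_ediv_cancel_left _ (by omega)]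

-- membership in A's list (cited by solve's decreasing_by)
theorem mem_f2listA (n m : Int) :
    m ∈ f2listA n ↔ ∃ x : Int, 1 ≤ x ∧ 2 * x ≤ n ∧ x ∣ n ∧ m = n / x - 1 := by
  unfold f2listA
  rw [PySem.List.foldl_append_if]
  simp only [List.nil_append, List.mem_map, List.mem_filter, PySem.List.mem_pyRange_one]
  constructor
  · rintro ⟨x, ⟨⟨hx1, hx2⟩, hmod⟩, hm⟩
    have hxpos : 0 < x := by omega
    have hdvdsub : x ∣ (n - x) := by
      have := (PySem.Int.mod_eq_zero_iff_dvd (n - x) x).mp (by simpa using hmod)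
      exact this
    have hdvd : x ∣ n := by
      have := dvd_add hdvdsub (dvd_refl x)
      simpa using this
    refine ⟨x, hx1, ?_, hdvd, ?_⟩
    · have : x ≤ PySem.Int.floordiv n 2 := by omega
      have := (PySem.Int.le_floordiv_iff_mul_le (a := n) (b := 2) (q := x) (by omega)).mp this
      omega
    · rw [← hm, PySem.Int.floordiv_eq_ediv_of_pos hxpos, div_sub_self x n hxpos hdvd]
  · rintro ⟨x, hx1, hx2, hdvd, hm⟩
    have hxpos : 0 < x := by omega
    refine ⟨x, ⟨⟨hx1, ?_⟩, ?_⟩, ?_⟩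
    · have : x ≤ PySem.Int.floordiv n 2 :=
        (PySem.Int.le_floordiv_iff_mul_le (a := n) (b := 2) (q := x) (by omega)).mpr (by omega)
      omega
    · have : x ∣ (n - x) := dvd_sub hdvd (dvd_refl x)
      have := (PySem.Int.mod_eq_zero_iff_dvd (n - x) x).mpr this
      simpa using this
    · rw [PySem.Int.floordiv_eq_ediv_of_pos hxpos, div_sub_self x n hxpos hdvd, hm]

-- the recursive argument shrinks (cited by solve's decreasing_by)
theorem solve_dec (n f2 : Int) (h : PySem.List.min? (f2listA n) (fun y => y) = some f2) :
    (PySem.Int.floordiv n (f2 + 1) * f2).toNat < n.toNat := by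
  have hmem : f2 ∈ f2listA n := PySem.List.min?_mem h
  obtain ⟨x, hx1, hx2, hdvd, hm⟩ := (mem_f2listA n f2).mp hmem
  obtain ⟨k, hk⟩ := hdvd
  have hxpos : 0 < x := by omega
  have hdx : n / x = k := by rw [hk, Int.mul_ediv_cancel_left _ (by omega)]
  have hk2 : 2 ≤ k := by nlinarith
  have hf2 : f2 = k - 1 := by omega
  have hfd : PySem.Int.floordiv n (f2 + 1) = x := by
    rw [PySem.Int.floordiv_eq_ediv_of_pos (by omega), hf2, show k - 1 + 1 = k by ring, hk,
        show x * k = k * x by ring, Int.mul_ediv_cancel_left _ (by omega)]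
  rw [hfd, hf2]
  have : x * (k - 1) = n - x := by rw [hk]; ring
  rw [this]
  omega

def solve (n : Int) : Int :=
  if n == 1 then 0
  else
    match hm : PySem.List.min? (f2listA n) (fun y => y) with
    | none => 0            -- Python: min([]) raises ValueError (outside Pre_)
    | some f2 => f2 + solve (PySem.Int.floordiv n (f2 + 1) * f2)   -- f1 = n // (f2+1); p = f1 * f2
termination_by n.toNat
decreasing_by exact solve_dec n f2 hm

-- ===== PORT B =====
-- B's inner while-loop: first d ≥ start with d*d ≤ n dividing n, else n
def spfAux (n d : Int) : Int :=
  if d * d ≤ n then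
    (if PySem.Int.mod n d == 0 then d else spfAux n (d + 1))
  else n
termination_by (n + 1 - d).toNat
decreasing_by
  have hd : d ≤ d * d := by nlinarith [mul_self_nonneg (d - 1)]
  omega

-- bounds on the trial-division result (cited by solveAltLoop's decreasing_by)
theorem spfAux_bounds (n d : Int) (hn : 2 ≤ n) (hd : 2 ≤ d) :
    2 ≤ spfAux n d ∧ spfAux n d ≤ n := by
  rw [spfAux]
  split
  · split
    · exact ⟨hd, by nlinarith⟩
    · exact spfAux_bounds n (d + 1) hn (by omega)
  · exact ⟨hn, le_rfl⟩
termination_by (n + 1 - d).toNat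
decreasing_by
  rename_i h _
  have hdd : d ≤ d * d := by nlinarith [mul_self_nonneg (d - 1)]
  omega

def solveAltLoop (n total : Int) : Int :=
  if 1 < n then
    -- spf = spfAux n 2 (B's inner loop), then total += spf - 1; n -= n // spf
    solveAltLoop (n - PySem.Int.floordiv n (spfAux n 2)) (total + (spfAux n 2 - 1))
  else total
termination_by n.toNat
decreasing_by
  rename_i h
  obtain ⟨h2, hle⟩ := spfAux_bounds n 2 (by omega) (by omega)
  have hq : 1 ≤ PySem.Int.floordiv n (spfAux n 2) ∧ PySem.Int.floordiv n (spfAux n 2) ≤ n := by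
    rw [PySem.Int.floordiv_eq_ediv_of_pos (by omega)]
    exact ⟨(Int.le_ediv_iff_mul_le (by omega)).mpr (by omega), Int.ediv_le_self _ (by omega)⟩
  omega

def solve_alt (n : Int) : Int := solveAltLoop n 0

-- ===== PRECONDITION & SPEC =====
-- Pre_ excludes n ≤ 0, where Python A raises ValueError (min of an empty list).
def Pre_solve (n : Int) : Prop := 1 ≤ n
instance (n : Int) : Decidable (Pre_solve n) := by unfold Pre_solve; infer_instance
def pvWitness_solve : Int := 12

def Spec_solve (n : Int) (out : Int) : Prop := out = solve_alt n
instance (n : Int) (out : Int) : Decidable (Spec_solve n out) := by unfold Spec_solve; infer_instance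

-- ===== CLAIM (what is proved, stated in full; the proofs are below) =====
def Claim_equal_solve : Prop := ∀ (n : Int), Dom_solve n → Pre_solve n → Spec_solve n (solve n)

-- ===== LEMMAS AND PROOFS =====

-- spfAux always returns a divisor of n
theorem spfAux_dvd (n d : Int) (hd : 0 < d) : spfAux n d ∣ n := by
  rw [spfAux]
  split
  · split
    · rename_i hmod
      exact (PySem.Int.mod_eq_zero_iff_dvd n d).mp (by simpa using hmod)
    · exact spfAux_dvd n (d + 1) (by omega)
  · exact dvd_refl n
termination_by (n + 1 - d).toNat
decreasing_by
  rename_i h _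
  have hdd : d ≤ d * d := by nlinarith [mul_self_nonneg (d - 1)]
  omega

-- minimality against any divisor c ≥ d with c*c ≤ n
theorem spfAux_le (n d c : Int) (hd0 : 0 < d) (hd : d ≤ c) (hc : c ∣ n) (hcc : c * c ≤ n) :
    spfAux n d ≤ c := by
  have hguard : d * d ≤ n := by nlinarith
  rw [spfAux, if_pos hguard]
  split
  · exact hd
  · rename_i hmod
    have hndvd : ¬ d ∣ n := by
      intro hdvd
      exact hmod (by simpa using (PySem.Int.mod_eq_zero_iff_dvd n d).mpr hdvd)
    have hne : d ≠ c := fun h => hndvd (h ▸ hc)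
    exact spfAux_le n (d + 1) c (by omega) (by omega) hc hcc
termination_by (n + 1 - d).toNat
decreasing_by
  have hdd : d ≤ d * d := by nlinarith [mul_self_nonneg (d - 1)]
  omega

-- minimality against every divisor ≥ 2
theorem spfAux_min (n e : Int) (hn : 2 ≤ n) (he : 2 ≤ e) (hdvd : e ∣ n) : spfAux n 2 ≤ e := by
  by_cases hee : e * e ≤ n
  · exact spfAux_le n 2 e (by omega) he hdvd hee
  · obtain ⟨k, hk⟩ := hdvd
    have hk1 : 1 ≤ k := by nlinarith
    by_cases hk2 : k = 1
    · have : e = n := by rw [hk, hk2, mul_one]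
      exact this ▸ (spfAux_bounds n 2 hn (by omega)).2
    · have hk2' : 2 ≤ k := by omega
      have hke : k < e := by nlinarith
      have hkdvd : k ∣ n := ⟨e, by rw [hk]; ring⟩
      have hkk : k * k ≤ n := by nlinarith
      have := spfAux_le n 2 k (by omega) hk2' hkdvd hkk
      omega

-- A's min is spf(n) - 1
theorem div_of_eq_mul (n a k : Int) (hk : 0 < k) (h : n = k * a) : n / k = a := by
  rw [h]; exact Int.mul_ediv_cancel_left _ (by omega)

theorem min_f2listA (n : Int) (hn : 2 ≤ n) :
    PySem.List.min? (f2listA n) (fun y => y) = some (spfAux n 2 - 1) := by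
  obtain ⟨hs2, hsn⟩ := spfAux_bounds n 2 hn (by omega)
  have hsd := spfAux_dvd n 2 (show (0:Int) < 2 by omega)
  have hsmin : ∀ e, 2 ≤ e → e ∣ n → spfAux n 2 ≤ e := fun e he hd => spfAux_min n e hn he hd
  generalize hgen : spfAux n 2 = s at hs2 hsn hsd hsmin ⊢
  obtain ⟨k, hk⟩ := hsd
  have hk1 : 1 ≤ k := by nlinarith
  have hdk : n / k = s := div_of_eq_mul n s k (by omega) (by rw [hk]; ring)
  have hmem : s - 1 ∈ f2listA n := by
    rw [mem_f2listA]
    exact ⟨k, hk1, by nlinarith, ⟨s, by rw [hk]; ring⟩, by omega⟩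
  have hmin : ∀ m ∈ f2listA n, s - 1 ≤ m := by
    intro m hmm
    obtain ⟨x, hx1, hx2, hxdvd, hmx⟩ := (mem_f2listA n m).mp hmm
    obtain ⟨j, hj⟩ := hxdvd
    have hdx : n / x = j := div_of_eq_mul n j x (by omega) hj
    rw [hdx] at hmx
    have hj2 : 2 ≤ j := by nlinarith
    have hjdvd : j ∣ n := ⟨x, by rw [hj]; ring⟩
    have := hsmin j hj2 hjdvd
    omega
  cases hmc : PySem.List.min? (f2listA n) (fun y => y) with
  | none =>
    rw [PySem.List.min?_eq_none_iff] at hmc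
    rw [hmc] at hmem
    cases hmem
  | some m =>
    have hm1 : m ∈ f2listA n := PySem.List.min?_mem hmc
    have h1 : m ≤ s - 1 := PySem.List.min?_isMin hmc _ hmem
    have h2 : s - 1 ≤ m := hmin m hm1
    exact congrArg some (by omega)

-- solve n = 0 below 2 (the n = 1 base and the junk value on the empty list)
theorem solve_base (n : Int) (hn : n < 2) : solve n = 0 := by
  by_cases h1 : n = 1
  · rw [solve, if_pos (by simpa using h1)]
  · have hnil : f2listA n = [] := by
      unfold f2listA
      rw [PySem.List.pyRange_one_eq_nil ?_]
      · rfl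
      · have := (PySem.Int.floordiv_lt_iff_lt_mul (a := n) (b := 2) (q := 1) (by omega)).mpr (by omega)
        omega
    rw [solve, if_neg (by simpa using h1)]
    split
    · rfl
    · rename_i f2 heq
      have hm := PySem.List.min?_mem heq
      rw [hnil] at hm
      cases hm

-- one step of A equals one step of B's loop body
theorem solve_step (n : Int) (hn : 2 ≤ n) :
    solve n = (spfAux n 2 - 1) + solve (n - PySem.Int.floordiv n (spfAux n 2)) := by
  obtain ⟨hs2, hsn⟩ := spfAux_bounds n 2 hn (by omega)
  have hsd := spfAux_dvd n 2 (show (0:Int) < 2 by omega)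
  have hm := min_f2listA n hn
  generalize hgen : spfAux n 2 = s at hs2 hsn hsd hm ⊢
  obtain ⟨k, hk⟩ := hsd
  have hk1 : 1 ≤ k := by nlinarith
  have hfd : PySem.Int.floordiv n s = k := by
    rw [PySem.Int.floordiv_eq_ediv_of_pos (show (0:Int) < s by omega)]
    exact div_of_eq_mul n k s (by omega) hk
  rw [solve, if_neg (by simp only [beq_iff_eq]; omega)]
  split
  · rename_i heq
    rw [hm] at heq
    cases heq
  · rename_i f2 heq
    rw [hm] at heq
    injection heq with heq
    subst heq
    have harg : PySem.Int.floordiv n (s - 1 + 1) * (s - 1) = n - PySem.Int.floordiv n s := by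
      rw [show s - 1 + 1 = s by ring, hfd, hk]
      ring
    rw [harg]

theorem loop_eq (N : Nat) : ∀ (n total : Int), n.toNat ≤ N → solveAltLoop n total = total + solve n := by
  induction N with
  | zero =>
    intro n total h
    rw [solveAltLoop, if_neg (by omega), solve_base n (by omega)]
    ring
  | succ N ih =>
    intro n total h
    by_cases h2 : 1 < n
    · obtain ⟨hs2, hsn⟩ := spfAux_bounds n 2 (by omega) (by omega)
      have hq : 1 ≤ PySem.Int.floordiv n (spfAux n 2) ∧ PySem.Int.floordiv n (spfAux n 2) ≤ n := by
        rw [PySem.Int.floordiv_eq_ediv_of_pos (by omega)]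
        exact ⟨(Int.le_ediv_iff_mul_le (by omega)).mpr (by omega), Int.ediv_le_self _ (by omega)⟩
      rw [solveAltLoop, if_pos h2]
      rw [ih (n - PySem.Int.floordiv n (spfAux n 2)) _ (by omega),
          solve_step n (by omega)]
      ring
    · rw [solveAltLoop, if_neg h2, solve_base n (by omega)]
      ring

-- ===== VERDICT (by name: the statement is the Claim_ definition above) =====
theorem solve_spec : Claim_equal_solve := by
  intro n _ _
  unfold Spec_solve solve_alt
  rw [loop_eq n.toNat n 0 le_rfl]
  omega
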